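-- pv_equiv track=rewrite | github.com/CodeS42/Sudoku_Solver | utils_sudoku.py | index_column_subgrid
-- ===== SOURCE A (Python) =====
-- def index_column_subgrid(b, j, nb_columns, nb_subcolumns):
--     while b < nb_columns - 1:
--         count = 0
--         while count < nb_subcolumns:
--             if j == b + count:
--                 return b
--             count += 1
--         b += nb_subcolumns
--     return b
-- ===== SOURCE B (Python) =====
-- def index_column_subgrid(b, j, nb_columns, nb_subcolumns):
--     # Closed-form floor-division arithmetic instead of scanning loops.
--     if b >= nb_columns - 1:
--         return b
--     cand = b + ((j - b) // nb_subcolumns) * nb_subcolumns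
--     if j >= b and cand < nb_columns - 1:
--         return cand
--     return b + (-((b - (nb_columns - 1)) // nb_subcolumns)) * nb_subcolumns
-- ===== Notes on version B (the rewrite author's own statement) =====
-- stated objective: faster
-- what changed: Replaced A's linear scan over block starts and in-block offsets by a closed-form floor-division formula (candidate block start, with a ceiling-division fallback for the last block).
import Mathlib
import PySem

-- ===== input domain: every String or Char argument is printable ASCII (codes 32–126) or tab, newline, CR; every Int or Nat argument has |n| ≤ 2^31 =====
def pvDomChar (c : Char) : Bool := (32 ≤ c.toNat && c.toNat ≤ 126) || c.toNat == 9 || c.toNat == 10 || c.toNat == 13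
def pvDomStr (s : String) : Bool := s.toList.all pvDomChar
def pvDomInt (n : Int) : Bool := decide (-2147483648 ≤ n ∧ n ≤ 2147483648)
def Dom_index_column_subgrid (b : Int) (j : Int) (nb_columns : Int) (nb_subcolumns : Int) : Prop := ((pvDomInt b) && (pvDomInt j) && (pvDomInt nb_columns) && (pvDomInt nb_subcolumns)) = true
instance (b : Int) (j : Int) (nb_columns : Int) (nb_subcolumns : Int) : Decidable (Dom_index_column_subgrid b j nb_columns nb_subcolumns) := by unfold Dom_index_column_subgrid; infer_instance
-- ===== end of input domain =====

-- B replaces A's nested block/offset scan by closed-form floor-division arithmetic.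

-- ===== PORT A =====
-- inner 'while count < nb_subcolumns' loop: returns true iff some count hits j == b + count
def icsInner (b j nb_subcolumns count : Int) : Bool :=
  if _h : count < nb_subcolumns then
    if j = b + count then true
    else icsInner b j nb_subcolumns (count + 1)
  else false
termination_by (nb_subcolumns - count).toNat
decreasing_by omega

-- outer 'while b < nb_columns - 1' loop; the 0 < nb_subcolumns guard only makes the
-- recursion total (Python A diverges there; such inputs are outside Pre_)
def icsOuter (b j nb_columns nb_subcolumns : Int) : Int :=
  if _h : b < nb_columns - 1 then
    if icsInner b j nb_subcolumns 0 then b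
    else if _hs : 0 < nb_subcolumns then icsOuter (b + nb_subcolumns) j nb_columns nb_subcolumns
    else b
  else b
termination_by (nb_columns - 1 - b).toNat
decreasing_by omega

def index_column_subgrid (b : Int) (j : Int) (nb_columns : Int) (nb_subcolumns : Int) : Int :=
  icsOuter b j nb_columns nb_subcolumns

-- ===== PORT B =====
def index_column_subgrid_alt (b : Int) (j : Int) (nb_columns : Int) (nb_subcolumns : Int) : Int :=
  if b ≥ nb_columns - 1 then b
  else
    let cand := b + (PySem.Int.floordiv (j - b) nb_subcolumns) * nb_subcolumns
    if j ≥ b ∧ cand < nb_columns - 1 then cand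
    else b + (-(PySem.Int.floordiv (b - (nb_columns - 1)) nb_subcolumns)) * nb_subcolumns

-- ===== PRECONDITION & SPEC =====
-- Pre_ excludes exactly the inputs where Python A diverges (nb_subcolumns ≤ 0 with the
-- outer loop entered); A returns on every input satisfying Pre_.
def Pre_index_column_subgrid (b : Int) (j : Int) (nb_columns : Int) (nb_subcolumns : Int) : Prop :=
  0 < nb_subcolumns ∨ nb_columns - 1 ≤ b
instance (b : Int) (j : Int) (nb_columns : Int) (nb_subcolumns : Int) : Decidable (Pre_index_column_subgrid b j nb_columns nb_subcolumns) := by unfold Pre_index_column_subgrid; infer_instance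
def pvWitness_index_column_subgrid : Int × Int × Int × Int := (0, 4, 9, 3)

def Spec_index_column_subgrid (b : Int) (j : Int) (nb_columns : Int) (nb_subcolumns : Int) (out : Int) : Prop := out = index_column_subgrid_alt b j nb_columns nb_subcolumns
instance (b : Int) (j : Int) (nb_columns : Int) (nb_subcolumns : Int) (out : Int) : Decidable (Spec_index_column_subgrid b j nb_columns nb_subcolumns out) := by unfold Spec_index_column_subgrid; infer_instance

-- ===== CLAIM (what is proved, stated in full; the proofs are below) =====
def Claim_equal_index_column_subgrid : Prop := ∀ (b : Int) (j : Int) (nb_columns : Int) (nb_subcolumns : Int), Dom_index_column_subgrid b j nb_columns nb_subcolumns → Pre_index_column_subgrid b j nb_columns nb_subcolumns → Spec_index_column_subgrid b j nb_columns nb_subcolumns (index_column_subgrid b j nb_columns nb_subcolumns)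

-- ===== LEMMAS AND PROOFS =====

lemma icsInner_iff (b j s c : Int) : icsInner b j s c = true ↔ (b + c ≤ j ∧ j < b + s) := by
  rw [icsInner]
  split_ifs with h1 h2
  · simp only [true_iff]; omega
  · rw [icsInner_iff b j s (c + 1)]; omega
  · simp only [false_iff]; omega
termination_by (s - c).toNat
decreasing_by omega

lemma alt_base (b j nc s : Int) (h : nc - 1 ≤ b) : index_column_subgrid_alt b j nc s = b := by
  unfold index_column_subgrid_alt
  rw [if_pos (by omega)]

lemma alt_found (b j nc s : Int) (hs : 0 < s) (hb : b < nc - 1) (h1 : b ≤ j) (h2 : j < b + s) :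
    index_column_subgrid_alt b j nc s = b := by
  unfold index_column_subgrid_alt
  rw [if_neg (by omega)]
  have hq : PySem.Int.floordiv (j - b) s = 0 :=
    (PySem.Int.floordiv_eq_iff_of_pos hs).2 (by constructor <;> omega)
  simp only [hq]
  rw [if_pos ⟨h1, by omega⟩]
  omega

lemma alt_step (b j nc s : Int) (hs : 0 < s) (hb : b < nc - 1) (hnf : ¬(b ≤ j ∧ j < b + s)) :
    index_column_subgrid_alt b j nc s = index_column_subgrid_alt (b + s) j nc s := by
  -- fallback value facts
  set q := PySem.Int.floordiv (b - (nc - 1)) s with hqdef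
  have hqb : q * s ≤ b - (nc - 1) ∧ b - (nc - 1) < (q + 1) * s :=
    (PySem.Int.floordiv_eq_iff_of_pos hs).1 rfl
  have hq2 : PySem.Int.floordiv (b + s - (nc - 1)) s = q + 1 := by
    rw [PySem.Int.floordiv_eq_iff_of_pos hs]
    constructor <;> nlinarith [hqb.1, hqb.2]
  unfold index_column_subgrid_alt
  rw [if_neg (by omega)]
  by_cases hjb : b ≤ j
  · -- j ≥ b + s here (since not in [b, b+s))
    have hjs : b + s ≤ j := by omega
    set p := PySem.Int.floordiv (j - b) s with hpdef
    have hpb : p * s ≤ j - b ∧ j - b < (p + 1) * s :=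
      (PySem.Int.floordiv_eq_iff_of_pos hs).1 rfl
    have hp1 : 1 ≤ p := by nlinarith [hpb.2]
    have hp2 : PySem.Int.floordiv (j - (b + s)) s = p - 1 := by
      rw [PySem.Int.floordiv_eq_iff_of_pos hs]
      constructor <;> nlinarith [hpb.1, hpb.2]
    have hcand : b + s + PySem.Int.floordiv (j - (b + s)) s * s
        = b + p * s := by rw [hp2]; ring
    by_cases hc : b + p * s < nc - 1
    · -- candidate block start is reached by A as well; both sides return it
      rw [if_pos ⟨hjb, by omega⟩]
      have hbs : ¬ (nc - 1 ≤ b + s) := by nlinarith [hpb.1]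
      rw [if_neg (by omega), if_pos ⟨by omega, by omega⟩, hcand]
    · -- candidate past the last block: both fall back to first start ≥ nc - 1
      rw [if_neg (by omega)]
      by_cases hbs : b + s ≥ nc - 1
      · -- one more step ends the loop: fallback equals b + s
        rw [if_pos (by omega)]
        have hq1 : q = -1 := by
          rw [hqdef, PySem.Int.floordiv_eq_iff_of_pos hs]
          constructor <;> omega
        rw [← hqdef, hq1]; ring
      · rw [if_neg (by omega), if_neg (by omega), hq2]; ring
  · -- j < b: never found; both reduce to the fallback
    rw [if_neg (by omega)]
    by_cases hbs : b + s ≥ nc - 1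
    · rw [if_pos (by omega)]
      have hq1 : q = -1 := by
        rw [hqdef, PySem.Int.floordiv_eq_iff_of_pos hs]
        constructor <;> omega
      rw [← hqdef, hq1]; ring
    · rw [if_neg (by omega), if_neg (by omega), hq2]; ring

lemma icsOuter_eq_alt (b j nc s : Int) (hpre : 0 < s ∨ nc - 1 ≤ b) :
    icsOuter b j nc s = index_column_subgrid_alt b j nc s := by
  rw [icsOuter]
  split_ifs with h1 h2 h3
  · have hf := (icsInner_iff b j s 0).1 h2
    rw [alt_found b j nc s (by omega) h1 (by omega) (by omega)]
  · rw [icsOuter_eq_alt (b + s) j nc s (Or.inl h3)]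
    refine (alt_step b j nc s h3 h1 ?_).symm
    intro hc
    exact h2 ((icsInner_iff b j s 0).2 ⟨by omega, by omega⟩)
  · omega
  · exact (alt_base b j nc s (by omega)).symm
termination_by (nc - 1 - b).toNat
decreasing_by omega

-- ===== VERDICT (by name: the statement is the Claim_ definition above) =====
theorem index_column_subgrid_spec : Claim_equal_index_column_subgrid := by
  intro b j nc s _ hpre
  unfold Spec_index_column_subgrid index_column_subgrid
  exact icsOuter_eq_alt b j nc s hpre
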